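-- pv_equiv track=rewrite | github.com/jacksonwlyons/CSE-231 | proj06.py | counties_in_state
-- ===== SOURCE A (Python) =====
-- from operator import itemgetter
--
-- def counties_in_state(state, master_list):
--     """This function returns a list of tuples with the counties and \
--         their median incomes in the state sorted in ascending order"""
--     counties_in_state = []
--     for element in master_list:
--         county = element[1]
--         median_income = element[2]
--         county_tuple = (county, median_income)
--         if state == element[0]:
--             counties_in_state.append(county_tuple)
--     counties_in_state = sorted(counties_in_state, key = itemgetter(0))
--     return counties_in_state
-- ===== SOURCE B (Python) =====
-- from operator import itemgetter
--
-- def counties_in_state(state, master_list):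
--     """Group all rows by state once, then sort the requested state's bucket."""
--     groups = {}
--     for element in master_list:
--         groups.setdefault(element[0], []).append((element[1], element[2]))
--     return sorted(groups.get(state, []), key=itemgetter(0))
-- ===== Notes on version B (the rewrite author's own statement) =====
-- stated objective: alternative
-- what changed: B builds a dict grouping every state to its (county, income) list in one pass and sorts the looked-up bucket, instead of A's single scan-and-test filtered accumulator.
import Mathlib
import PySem

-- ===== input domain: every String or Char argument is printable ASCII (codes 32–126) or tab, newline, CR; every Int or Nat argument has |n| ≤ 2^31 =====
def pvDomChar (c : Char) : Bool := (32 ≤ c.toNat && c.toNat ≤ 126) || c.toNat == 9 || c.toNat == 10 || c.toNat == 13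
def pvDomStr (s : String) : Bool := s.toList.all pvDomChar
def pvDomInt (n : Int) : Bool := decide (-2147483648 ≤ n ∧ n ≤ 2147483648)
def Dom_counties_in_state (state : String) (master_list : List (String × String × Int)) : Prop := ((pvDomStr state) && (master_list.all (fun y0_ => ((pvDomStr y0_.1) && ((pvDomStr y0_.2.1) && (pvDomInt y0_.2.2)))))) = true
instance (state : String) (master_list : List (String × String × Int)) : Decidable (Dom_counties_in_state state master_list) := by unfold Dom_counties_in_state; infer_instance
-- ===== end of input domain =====

-- B groups all rows by state into a dict in one pass and sorts the looked-up bucket,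
-- instead of A's filtered accumulator (objective: alternative decomposition; same cost).

-- ===== PORT A =====
def counties_in_state (state : String) (master_list : List (String × String × Int)) : List (String × Int) :=
  let cs := master_list.foldl (fun acc element =>
    let county := element.2.1
    let median_income := element.2.2
    let county_tuple := (county, median_income)
    if state == element.1 then acc ++ [county_tuple] else acc) []
  PySem.List.sorted cs (fun t => t.1) false

-- ===== PORT B =====
def counties_in_state_alt (state : String) (master_list : List (String × String × Int)) : List (String × Int) :=
  -- groups.setdefault(element[0], []).append((element[1], element[2])) == d[k] = d.get(k, []) ++ [v]
  let groups : PySem.Dict String (List (String × Int)) := master_list.foldl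
    (fun d element => d.modify element.1 [] (· ++ [(element.2.1, element.2.2)]))
    PySem.Dict.empty
  PySem.List.sorted (groups.getD state []) (fun t => t.1) false

-- ===== PRECONDITION & SPEC =====
def Spec_counties_in_state (state : String) (master_list : List (String × String × Int)) (out : List (String × Int)) : Prop := out = counties_in_state_alt state master_list
instance (state : String) (master_list : List (String × String × Int)) (out : List (String × Int)) : Decidable (Spec_counties_in_state state master_list out) := by unfold Spec_counties_in_state; infer_instance

-- ===== CLAIM (what is proved, stated in full; the proofs are below) =====
def Claim_equal_counties_in_state : Prop := ∀ (state : String) (master_list : List (String × String × Int)), Dom_counties_in_state state master_list → Spec_counties_in_state state master_list (counties_in_state state master_list)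

-- ===== LEMMAS AND PROOFS =====
theorem counties_lists_eq (state : String) (master_list : List (String × String × Int)) :
    (master_list.foldl (fun acc element =>
      if state == element.1 then acc ++ [(element.2.1, element.2.2)] else acc) []) =
    ((master_list.foldl (fun d element =>
      d.modify element.1 [] (· ++ [(element.2.1, element.2.2)]))
      (PySem.Dict.empty : PySem.Dict String (List (String × Int)))).getD state []) := by
  have hB := PySem.Dict.getD_foldl_modify_append
      (l := master_list.map (fun e => (e.1, (e.2.1, e.2.2))))
      (d := (PySem.Dict.empty : PySem.Dict String (List (String × Int)))) (c := state)
  rw [List.foldl_map] at hB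
  rw [hB, List.filter_map, List.map_map]
  rw [PySem.List.foldl_append_if (p := fun e => state == e.1)
      (f := fun e => (e.2.1, e.2.2)) (l := master_list) (acc := [])]
  simp only [PySem.Dict.getD_empty, List.nil_append]
  congr 1
  apply List.filter_congr
  intro x _
  simp [BEq.comm]

-- ===== VERDICT (by name: the statement is the Claim_ definition above) =====
theorem counties_in_state_spec : Claim_equal_counties_in_state := by
  intro state master_list _
  unfold Spec_counties_in_state counties_in_state counties_in_state_alt
  rw [counties_lists_eq]
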